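-- pv_equiv track=rewrite | github.com/diosaog/PokeApp | liga_tabla.py | _wins_losses
-- ===== SOURCE A (Python) =====
-- def _wins_losses(players: list[str], results: dict[tuple[str, str], str]) -> dict:
--     table = {p: {"W": 0, "L": 0} for p in players}
--     for (p1, p2), w in results.items():
--         if w is None:
--             continue
--         loser = p2 if w == p1 else p1
--         table[w]["W"] += 1
--         table[loser]["L"] += 1
--     return table
-- ===== SOURCE B (Python) =====
-- def _wins_losses(players: list[str], results: dict[tuple[str, str], str]) -> dict:
--     table = {}
--     for p in players:
--         table[p] = {"W": 0, "L": 0}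
--     matches = [(w, p2 if w == p1 else p1) for (p1, p2), w in results.items() if w is not None]
--     for winner, _ in matches:
--         row = table[winner]
--         row["W"] = row["W"] + 1
--     for _, loser in matches:
--         row = table[loser]
--         row["L"] = row["L"] + 1
--     return table
-- ===== Notes on version B (the rewrite author's own statement) =====
-- stated objective: alternative
-- what changed: A interleaves the two tallies, bumping the winner's W and the loser's L together inside one pass over the results; B first collects one (winner, loser) pair per match, then builds the zeroed table and aggregates each field in its own separate pass (all W counts, then all L counts), proved equal via commutation of the single-field updates; Pre_ additionally excludes association lists with a repeated (p1,p2) key, which do not represent any Python dict, and the inputs where a winner or loser is missing from players, on which both programs raise KeyError.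
import Mathlib
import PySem

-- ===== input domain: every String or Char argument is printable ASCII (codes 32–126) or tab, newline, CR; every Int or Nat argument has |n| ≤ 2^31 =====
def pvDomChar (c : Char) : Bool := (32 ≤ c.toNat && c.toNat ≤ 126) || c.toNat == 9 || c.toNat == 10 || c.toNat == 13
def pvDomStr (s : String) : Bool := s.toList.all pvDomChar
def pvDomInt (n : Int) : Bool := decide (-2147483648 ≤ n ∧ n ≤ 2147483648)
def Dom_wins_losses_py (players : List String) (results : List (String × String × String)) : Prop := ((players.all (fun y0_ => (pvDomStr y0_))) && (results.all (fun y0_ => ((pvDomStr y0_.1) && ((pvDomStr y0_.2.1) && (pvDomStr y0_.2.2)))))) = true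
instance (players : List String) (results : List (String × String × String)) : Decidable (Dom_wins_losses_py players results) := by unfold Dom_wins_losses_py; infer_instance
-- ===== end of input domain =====

-- B replaces A's single combined pass (which bumps W and L together per match) by a collect
-- phase — one (winner, loser) pair per match — followed by two separate single-field
-- aggregation passes; equivalence of the RETURN value is proved (neither program mutates its
-- arguments). The winner type is String here (no None entries), so A's `w is None` filter is
-- vacuous on this domain and is not ported.

-- ===== PORT A =====
-- the fresh row {"W": 0, "L": 0}
def wlRow : PySem.Dict String Int := (PySem.Dict.empty.insert "W" 0).insert "L" 0

-- table = {p: {"W": 0, "L": 0} for p in players}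
def wlInit (players : List String) : PySem.Dict String (PySem.Dict String Int) :=
  players.foldl (fun d p => d.insert p wlRow) PySem.Dict.empty

-- table[w]["W"] += 1  (Python raises KeyError when w is absent; Pre_ excludes that, and on
-- present keys Dict.modify is exact)
def wlIncW (t : PySem.Dict String (PySem.Dict String Int)) (w : String) :
    PySem.Dict String (PySem.Dict String Int) :=
  t.modify w PySem.Dict.empty (fun inn => inn.modify "W" 0 (· + 1))

-- table[loser]["L"] += 1  (same remark)
def wlIncL (t : PySem.Dict String (PySem.Dict String Int)) (l : String) :
    PySem.Dict String (PySem.Dict String Int) :=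
  t.modify l PySem.Dict.empty (fun inn => inn.modify "L" 0 (· + 1))

-- loser = p2 if w == p1 else p1
def wlLoser (r : String × String × String) : String := if r.2.2 = r.1 then r.2.1 else r.1

-- one iteration of A's loop body
def wlStep (t : PySem.Dict String (PySem.Dict String Int)) (r : String × String × String) :
    PySem.Dict String (PySem.Dict String Int) :=
  let loser := wlLoser r
  wlIncL (wlIncW t r.2.2) loser

def wins_losses_py (players : List String) (results : List (String × String × String)) :
    List (String × List (String × Int)) :=
  ((results.foldl wlStep (wlInit players)).items).map (fun kv => (kv.1, kv.2.items))

-- ===== PORT B =====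
-- `row = table[x]; row["F"] = row["F"] + 1` mutates the row object held by the table, i.e. the
-- table after it is exactly Dict.modify at x (KeyError when x is absent, excluded by Pre_)
def wins_losses_py_alt (players : List String) (results : List (String × String × String)) :
    List (String × List (String × Int)) :=
  let table0 := players.foldl (fun t p => t.insert p wlRow) PySem.Dict.empty
  let ms := results.map (fun r => (r.2.2, wlLoser r))
  let table1 := ms.foldl (fun t m => wlIncW t m.1) table0
  let table2 := ms.foldl (fun t m => wlIncL t m.2) table1
  (table2.items).map (fun kv => (kv.1, kv.2.items))

-- ===== PRECONDITION & SPEC =====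
-- Pre_ excludes (a) inputs on which A raises KeyError (a match whose winner or loser is not in
-- players), and (b) association lists with a repeated (p1,p2) key, which do not represent any
-- Python dict (the results parameter is a dict, whose keys are unique by construction).
def Pre_wins_losses_py (players : List String) (results : List (String × String × String)) : Prop :=
  (results.map (fun r => (r.1, r.2.1))).Nodup ∧
  ∀ r ∈ results, r.2.2 ∈ players ∧ (if r.2.2 = r.1 then r.2.1 else r.1) ∈ players
instance (players : List String) (results : List (String × String × String)) : Decidable (Pre_wins_losses_py players results) := by unfold Pre_wins_losses_py; infer_instance

def pvWitness_wins_losses_py : List String × (List (String × String × String)) :=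
  (["a", "b"], [("a", "b", "a")])

def Spec_wins_losses_py (players : List String) (results : List (String × String × String)) (out : List (String × List (String × Int))) : Prop := out = wins_losses_py_alt players results
instance (players : List String) (results : List (String × String × String)) (out : List (String × List (String × Int))) : Decidable (Spec_wins_losses_py players results out) := by unfold Spec_wins_losses_py; infer_instance

-- ===== CLAIM (what is proved, stated in full; the proofs are below) =====
def Claim_equal_wins_losses_py : Prop := ∀ (players : List String) (results : List (String × String × String)), Dom_wins_losses_py players results → Pre_wins_losses_py players results → Spec_wins_losses_py players results (wins_losses_py players results)

-- ===== LEMMAS AND PROOFS =====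

-- the loop invariant: every player has a row, and every row has its "W" and "L" fields
def wlInv (ps : List String) (t : PySem.Dict String (PySem.Dict String Int)) : Prop :=
  ∀ p ∈ ps, t.contains p = true ∧
    (t.getD p PySem.Dict.empty).contains "W" = true ∧
    (t.getD p PySem.Dict.empty).contains "L" = true

lemma dict_ext {κ ν : Type} [BEq κ] (d e : PySem.Dict κ ν) (h : d.items = e.items) : d = e := by
  cases d; cases e; simpa using h

lemma ins_ins_self {κ ν : Type} [BEq κ] [LawfulBEq κ] (d : PySem.Dict κ ν) (k : κ) (v v' : ν) :
    (d.insert k v).insert k v' = d.insert k v' := by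
  apply dict_ext
  by_cases h : d.contains k = true
  · simp only [PySem.Dict.items_insert, h, PySem.Dict.contains_insert_self, if_true,
      List.map_map]
    apply List.map_congr_left
    intro p _
    by_cases hp : (p.1 == k) = true <;> simp [hp, Function.comp]
  · simp only [Bool.not_eq_true] at h
    have hnone : ∀ p ∈ d.items, (p.1 == k) = false := by
      have h' : d.items.any (fun p => p.1 == k) = false := h
      intro p hp
      simpa using List.any_eq_false.mp h' p hp
    simp only [PySem.Dict.items_insert, h, PySem.Dict.contains_insert_self, if_true,
      Bool.false_eq_true, if_false, List.map_append]
    congr 1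
    · conv_rhs => rw [← List.map_id d.items]
      apply List.map_congr_left
      intro p hp
      simp [hnone p hp]
    · simp

lemma ins_ins_comm {κ ν : Type} [BEq κ] [LawfulBEq κ] (d : PySem.Dict κ ν) (k1 k2 : κ)
    (v1 v2 : ν) (hne : k1 ≠ k2) (h1 : d.contains k1 = true) :
    (d.insert k1 v1).insert k2 v2 = (d.insert k2 v2).insert k1 v1 := by
  have hbne : (k2 == k1) = false := by simp [Ne.symm hne]
  have hbne' : (k1 == k2) = false := by simp [hne]
  apply dict_ext
  by_cases h2 : d.contains k2 = true
  · have c1 : (d.insert k1 v1).contains k2 = true := by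
      simp [PySem.Dict.contains_insert, h2]
    have c2 : (d.insert k2 v2).contains k1 = true := by
      simp [PySem.Dict.contains_insert, h1]
    simp only [PySem.Dict.items_insert, h1, h2, c1, c2, if_true, List.map_map]
    apply List.map_congr_left
    intro p _
    by_cases hp1 : (p.1 == k1) = true
    · have : p.1 = k1 := by simpa using hp1
      simp [Function.comp, this, hbne']
    · by_cases hp2 : (p.1 == k2) = true <;>
        simp [Function.comp, hp1, hp2, hbne]
  · simp only [Bool.not_eq_true] at h2
    have c1 : (d.insert k1 v1).contains k2 = false := by
      simp [PySem.Dict.contains_insert, h2, hbne]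
    have c2 : (d.insert k2 v2).contains k1 = true := by
      simp [PySem.Dict.contains_insert, h1]
    simp only [PySem.Dict.items_insert, h1, h2, c1, c2, if_true, Bool.false_eq_true, if_false,
      List.map_append]
    simp [hbne]

lemma inner_comm (inn : PySem.Dict String Int) (hL : inn.contains "L" = true) :
    (inn.insert "L" (inn.getD "L" 0 + 1)).insert "W"
        ((inn.insert "L" (inn.getD "L" 0 + 1)).getD "W" 0 + 1) =
      (inn.insert "W" (inn.getD "W" 0 + 1)).insert "L"
        ((inn.insert "W" (inn.getD "W" 0 + 1)).getD "L" 0 + 1) := by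
  have hWL : ("W" : String) ≠ "L" := by decide
  have e1 : (inn.insert "L" (inn.getD "L" 0 + 1)).getD "W" 0 = inn.getD "W" 0 := by
    simp [PySem.Dict.getD_insert, hWL]
  have e2 : (inn.insert "W" (inn.getD "W" 0 + 1)).getD "L" 0 = inn.getD "L" 0 := by
    simp [PySem.Dict.getD_insert, hWL.symm]
  rw [e1, e2]
  exact ins_ins_comm inn "L" "W" _ _ hWL.symm hL

lemma incWL_comm (t : PySem.Dict String (PySem.Dict String Int)) (l w : String)
    (hl : t.contains l = true)
    (hL : (t.getD l PySem.Dict.empty).contains "L" = true) :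
    wlIncW (wlIncL t l) w = wlIncL (wlIncW t w) l := by
  by_cases hwl : w = l
  · subst hwl
    simp only [wlIncW, wlIncL, PySem.Dict.modify, PySem.Dict.getD_insert_self,
      ins_ins_self]
    rw [inner_comm _ hL]
  · have ew : (t.insert l ((t.getD l PySem.Dict.empty).insert "L"
        ((t.getD l PySem.Dict.empty).getD "L" 0 + 1))).getD w PySem.Dict.empty =
        t.getD w PySem.Dict.empty := by
      simp [PySem.Dict.getD_insert, hwl]
    have el : (t.insert w ((t.getD w PySem.Dict.empty).insert "W"
        ((t.getD w PySem.Dict.empty).getD "W" 0 + 1))).getD l PySem.Dict.empty =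
        t.getD l PySem.Dict.empty := by
      simp [PySem.Dict.getD_insert, Ne.symm hwl]
    simp only [wlIncW, wlIncL, PySem.Dict.modify, ew, el]
    exact ins_ins_comm t l w _ _ (Ne.symm hwl) hl

lemma inv_incW (ps : List String) (t : PySem.Dict String (PySem.Dict String Int)) (w : String)
    (hInv : wlInv ps t) (hw : w ∈ ps) : wlInv ps (wlIncW t w) := by
  intro p hp
  obtain ⟨hc, hpW, hpL⟩ := hInv p hp
  obtain ⟨_, hwW, hwL⟩ := hInv w hw
  refine ⟨?_, ?_, ?_⟩
  · simp [wlIncW, PySem.Dict.contains_modify, hc]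
  · by_cases hpw : p = w
    · subst hpw
      simp [wlIncW, PySem.Dict.modify, PySem.Dict.getD_insert_self]
    · simp [wlIncW, PySem.Dict.modify, PySem.Dict.getD_insert, hpw, hpW]
  · by_cases hpw : p = w
    · subst hpw
      simp [wlIncW, PySem.Dict.modify, PySem.Dict.getD_insert_self,
        PySem.Dict.contains_insert, hwL]
    · simp [wlIncW, PySem.Dict.modify, PySem.Dict.getD_insert, hpw, hpL]

lemma inv_incL (ps : List String) (t : PySem.Dict String (PySem.Dict String Int)) (l : String)
    (hInv : wlInv ps t) (hl : l ∈ ps) : wlInv ps (wlIncL t l) := by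
  intro p hp
  obtain ⟨hc, hpW, hpL⟩ := hInv p hp
  obtain ⟨_, hlW, hlL⟩ := hInv l hl
  refine ⟨?_, ?_, ?_⟩
  · simp [wlIncL, PySem.Dict.contains_modify, hc]
  · by_cases hpl : p = l
    · subst hpl
      simp [wlIncL, PySem.Dict.modify, PySem.Dict.getD_insert_self,
        PySem.Dict.contains_insert, hlW]
    · simp [wlIncL, PySem.Dict.modify, PySem.Dict.getD_insert, hpl, hpW]
  · by_cases hpl : p = l
    · subst hpl
      simp [wlIncL, PySem.Dict.modify, PySem.Dict.getD_insert_self]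
    · simp [wlIncL, PySem.Dict.modify, PySem.Dict.getD_insert, hpl, hpL]

lemma push_incL (ps : List String) (ms : List (String × String)) :
    ∀ (t : PySem.Dict String (PySem.Dict String Int)) (l : String), wlInv ps t → l ∈ ps →
      (∀ m ∈ ms, m.1 ∈ ps) →
      ms.foldl (fun t m => wlIncW t m.1) (wlIncL t l) =
        wlIncL (ms.foldl (fun t m => wlIncW t m.1) t) l := by
  induction ms with
  | nil => intro t l _ _ _; simp
  | cons m ms ih =>
    intro t l hInv hl hms
    obtain ⟨hc, _, hL⟩ := hInv l hl
    simp only [List.foldl_cons]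
    rw [incWL_comm t l m.1 hc hL,
      ih (wlIncW t m.1) l (inv_incW ps t m.1 hInv (hms m (by simp))) hl
        (fun x hx => hms x (by simp [hx]))]

lemma main_fold (ps : List String) (rs : List (String × String × String)) :
    ∀ t : PySem.Dict String (PySem.Dict String Int), wlInv ps t →
      (∀ r ∈ rs, r.2.2 ∈ ps ∧ wlLoser r ∈ ps) →
      rs.foldl wlStep t =
        (rs.map (fun r => (r.2.2, wlLoser r))).foldl (fun t m => wlIncL t m.2)
          ((rs.map (fun r => (r.2.2, wlLoser r))).foldl (fun t m => wlIncW t m.1) t) := by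
  induction rs with
  | nil => intro t _ _; simp
  | cons r rs ih =>
    intro t hInv hrs
    obtain ⟨hw, hl⟩ := hrs r (by simp)
    have hInv' : wlInv ps (wlIncW t r.2.2) := inv_incW ps t _ hInv hw
    have hInv'' : wlInv ps (wlIncL (wlIncW t r.2.2) (wlLoser r)) :=
      inv_incL ps _ _ hInv' hl
    have hstep : wlStep t r = wlIncL (wlIncW t r.2.2) (wlLoser r) := rfl
    have hms : ∀ m ∈ rs.map (fun r => (r.2.2, wlLoser r)), m.1 ∈ ps := by
      intro m hm
      obtain ⟨r', hr', hr'm⟩ := List.mem_map.mp hm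
      exact hr'm ▸ (hrs r' (by simp [hr'])).1
    simp only [List.map_cons, List.foldl_cons]
    rw [← push_incL ps (rs.map (fun r => (r.2.2, wlLoser r))) (wlIncW t r.2.2) (wlLoser r)
        hInv' hl hms,
      ← hstep, ih (wlStep t r) (hstep ▸ hInv'')
        (fun r' hr' => hrs r' (List.mem_cons_of_mem _ hr'))]

lemma contains_foldl_insert (ps : List String) :
    ∀ (d : PySem.Dict String (PySem.Dict String Int)) (p : String), d.contains p = true →
      (ps.foldl (fun d p => d.insert p wlRow) d).contains p = true := by
  induction ps with
  | nil => intro d p h; simpa using h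
  | cons q ps ih =>
    intro d p h
    simp only [List.foldl_cons]
    exact ih _ p (by simp [PySem.Dict.contains_insert, h])

lemma init_contains (ps : List String) :
    ∀ (d : PySem.Dict String (PySem.Dict String Int)) (p : String), p ∈ ps →
      (ps.foldl (fun d p => d.insert p wlRow) d).contains p = true := by
  induction ps with
  | nil => intro _ _ h; simp at h
  | cons q ps ih =>
    intro d p hp
    simp only [List.foldl_cons]
    by_cases hps : p ∈ ps
    · exact ih _ p hps
    · have hpq : p = q := by
        rcases List.mem_cons.mp hp with h | h
        · exact h
        · exact absurd h hps
      subst hpq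
      exact contains_foldl_insert ps _ p (by simp [PySem.Dict.contains_insert_self])

lemma init_getD (ps : List String) :
    ∀ (d : PySem.Dict String (PySem.Dict String Int)) (p : String),
      (ps.foldl (fun d p => d.insert p wlRow) d).getD p PySem.Dict.empty =
        if p ∈ ps then wlRow else d.getD p PySem.Dict.empty := by
  induction ps with
  | nil => intro d p; simp
  | cons q ps ih =>
    intro d p
    simp only [List.foldl_cons, ih]
    by_cases hps : p ∈ ps
    · simp [hps]
    · by_cases hpq : p = q
      · subst hpq; simp [hps, PySem.Dict.getD_insert_self]
      · simp [hps, hpq, PySem.Dict.getD_insert]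

lemma inv_init (ps : List String) : wlInv ps (wlInit ps) := by
  intro p hp
  refine ⟨init_contains ps PySem.Dict.empty p hp, ?_, ?_⟩ <;>
  · rw [wlInit, init_getD ps PySem.Dict.empty p]
    simp only [hp, if_true]
    decide

-- ===== VERDICT (by name: the statement is the Claim_ definition above) =====
theorem wins_losses_py_spec : Claim_equal_wins_losses_py := by
  intro players results _hDom hPre
  unfold Spec_wins_losses_py wins_losses_py wins_losses_py_alt
  rw [main_fold players results (wlInit players) (inv_init players)
    (fun r hr => by
      obtain ⟨h1, h2⟩ := hPre.2 r hr
      exact ⟨h1, by simpa [wlLoser] using h2⟩)]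
  rfl
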